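-- pv_equiv track=rewrite | github.com/flaviacaetanoliveira-ui/FDL_Consultoria | processing/faturamento/io_notas_entrada.py | _detect_col_desconto_nota
-- ===== SOURCE A (Python) =====
-- def _norm_head(c: str) -> str:
--     return str(c).strip().casefold()
--
-- def _detect_col_desconto_nota(columns: list[str]) -> str:
--     for c in columns:
--         n = _norm_head(c)
--         if n == "desconto":
--             return c
--     for c in columns:
--         n = _norm_head(c)
--         if "desconto" in n and "frete" not in n and "proporcional" not in n:
--             return c
--     return ""
-- ===== SOURCE B (Python) =====
-- def _norm_head(c: str) -> str:
--     return str(c).strip().casefold()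
--
-- def _detect_col_desconto_nota(columns: list[str]) -> str:
--     fallback = None
--     for c in columns:
--         n = _norm_head(c)
--         if n == "desconto":
--             return c
--         if fallback is None and "desconto" in n and "frete" not in n and "proporcional" not in n:
--             fallback = c
--     return fallback if fallback is not None else ""
-- ===== Notes on version B (the rewrite author's own statement) =====
-- stated objective: alternative
-- what changed: Replaced A's two full scans (exact pass, then fuzzy pass) by a single scan that normalizes each header once, returns on an exact match, and records the first fuzzy match in a fallback variable returned at the end.
import Mathlib
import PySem

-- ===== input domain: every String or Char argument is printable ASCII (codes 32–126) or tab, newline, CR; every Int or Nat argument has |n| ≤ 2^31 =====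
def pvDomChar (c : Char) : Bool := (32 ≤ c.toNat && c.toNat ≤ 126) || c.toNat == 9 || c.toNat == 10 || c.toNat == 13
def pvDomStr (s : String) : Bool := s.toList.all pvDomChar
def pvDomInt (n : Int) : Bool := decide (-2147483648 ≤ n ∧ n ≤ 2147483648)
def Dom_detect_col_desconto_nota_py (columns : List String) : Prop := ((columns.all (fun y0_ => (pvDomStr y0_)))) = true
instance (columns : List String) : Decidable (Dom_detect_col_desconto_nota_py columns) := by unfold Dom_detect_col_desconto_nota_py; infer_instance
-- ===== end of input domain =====

-- B merges A's two scans into a single pass that normalizes each header once,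
-- returning on an exact match and otherwise keeping the first fuzzy match as a fallback.


-- ===== PORT A =====
-- _norm_head: str(c).strip().casefold(); casefold = lower on the ASCII domain (exact there)
def pvNormHead (c : String) : String := PySem.Str.lower (PySem.Str.strip c)

-- first loop of A: return the first exact match
def pvLoopExact : List String → Option String
  | [] => none
  | c :: rest => if pvNormHead c == "desconto" then some c else pvLoopExact rest

-- second loop of A: return the first fuzzy match
def pvFuzzy (n : String) : Bool :=
  PySem.Str.isIn "desconto" n && !PySem.Str.isIn "frete" n && !PySem.Str.isIn "proporcional" n

def pvLoopFuzzy : List String → Option String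
  | [] => none
  | c :: rest => if pvFuzzy (pvNormHead c) then some c else pvLoopFuzzy rest

def detect_col_desconto_nota_py (columns : List String) : String :=
  match pvLoopExact columns with
  | some c => c
  | none =>
    match pvLoopFuzzy columns with
    | some c => c
    | none => ""

-- ===== PORT B =====
-- single scan with a fallback accumulator (Source B's loop)
def pvAltLoop : List String → Option String → String
  | [], fb => fb.getD ""
  | c :: rest, fb =>
    let n := pvNormHead c
    if n == "desconto" then c
    else pvAltLoop rest (if fb.isNone && pvFuzzy n then some c else fb)

def detect_col_desconto_nota_py_alt (columns : List String) : String :=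
  pvAltLoop columns none

-- ===== PRECONDITION & SPEC =====
def Spec_detect_col_desconto_nota_py (columns : List String) (out : String) : Prop := out = detect_col_desconto_nota_py_alt columns
instance (columns : List String) (out : String) : Decidable (Spec_detect_col_desconto_nota_py columns out) := by unfold Spec_detect_col_desconto_nota_py; infer_instance

-- ===== CLAIM (what is proved, stated in full; the proofs are below) =====
def Claim_equal_detect_col_desconto_nota_py : Prop := ∀ (columns : List String), Dom_detect_col_desconto_nota_py columns → Spec_detect_col_desconto_nota_py columns (detect_col_desconto_nota_py columns)

-- ===== LEMMAS AND PROOFS =====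
-- invariant of B's single pass: exact match wins; else the fallback; else A's fuzzy scan
theorem pvAltLoop_eq (columns : List String) (fb : Option String) :
    pvAltLoop columns fb =
      match pvLoopExact columns with
      | some c => c
      | none =>
        match fb with
        | some f => f
        | none => (pvLoopFuzzy columns).getD "" := by
  induction columns generalizing fb with
  | nil => cases fb <;> rfl
  | cons c rest ih =>
    simp only [pvAltLoop, pvLoopExact, pvLoopFuzzy]
    by_cases h : pvNormHead c == "desconto"
    · simp [h]
    · simp only [h]
      rw [ih]
      cases hre : pvLoopExact rest <;> cases fb <;>
        by_cases hf : pvFuzzy (pvNormHead c) <;> simp [hf]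

-- ===== VERDICT (by name: the statement is the Claim_ definition above) =====
theorem detect_col_desconto_nota_py_spec : Claim_equal_detect_col_desconto_nota_py := by
  intro columns _
  unfold Spec_detect_col_desconto_nota_py detect_col_desconto_nota_py_alt detect_col_desconto_nota_py
  rw [pvAltLoop_eq]
  cases pvLoopExact columns <;> cases h : pvLoopFuzzy columns <;> simp
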